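-- pv_equiv track=rewrite | github.com/santras/SannaHYAvoinTIRA_vko3_7 | abcstring.py | solve
-- ===== SOURCE A (Python) =====
-- def solve(kirjainjono):
--     pituus = len(kirjainjono)
--     jarjestetty = sorted(kirjainjono)
--
--     # Kuinka paljon alusta yksittäisiä kirjaimia
--     A_pituus = 0
--     B_pituus = 0
--
--     for ii in range(pituus):
--         if jarjestetty[ii] == 'A':
--             A_pituus += 1
--         elif jarjestetty[ii] == 'B':
--             B_pituus += 1
--         else:
--             break
--
--    # Katsotaan erikseen A,B:n paikat ja pistetään ideksit muistiin missä kirjaimia väärällä paikalla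
--    # C:tä ei tarvitse erikseen katsoa, koska vaihdetaan aina päikseen niin C korjaantuu kun A ja B korjattu
--     A_vaarin = []   # Lista A kirjaimen idekseistä jotka ovat A-alueen ulkopuolella
--     B_vaarin = []   # Lista B kirjaimen idekseistä jotka ovat A-alueen ulkopuolella
--
--     for ii in range(pituus):
--         if ii < A_pituus :                                          # A:n paikat
--             if kirjainjono[ii] == 'B':
--                 B_vaarin.append(ii)
--         if (ii >= A_pituus) and ii < (A_pituus + B_pituus) :        # B:n paikat
--             if kirjainjono[ii] == 'A':
--                 A_vaarin.append(ii)
--         elif ii >= (A_pituus + B_pituus):                           # C:n paikat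
--             if kirjainjono[ii] == 'A':
--                 A_vaarin.append(ii)
--             elif kirjainjono[ii] == 'B':
--                 B_vaarin.append(ii)
--
--     #Tarvittava siirtojen määrä kun vaihdetaan pois väärät kirjaimet A:n paikoilta
--     siirtoja = 0
--     A_ind_alkupaa = 0   # Indeksi virheellisesti oleville A-kirjaimille alkupäästä
--     B_fiksattuja = 0
--     for ii in range(A_pituus):
--         if kirjainjono[ii] != 'A':
--             siirtoja += 1
--             # kokeillaan saadaanko fiksattua samalla B:n  vääriä paikkoja
--             if (kirjainjono[ii] == 'B') and ( A_vaarin[A_ind_alkupaa] < (A_pituus + B_pituus) ):             # C:t vaihdettaisiin mielummin loppupään kirjaimien kanssa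
--                 B_fiksattuja += 1
--                 A_ind_alkupaa += 1
--             elif (kirjainjono[ii] == 'B'):
--                 A_ind_alkupaa += 1
--
--     # Lisätään siirtoihin virheellisesti sijoitetut B:t lukuunottamatta jo A:n siiroilla fiksattuja
--     siirtoja += len(B_vaarin) - B_fiksattuja                # C:t korjaantuvat samalla
--     return siirtoja
-- ===== SOURCE B (Python) =====
-- def solve(kirjainjono):
--     # Sizes of the A- and B-regions: the run of 'A's then 'B's at the
--     # front of the sorted string.
--     a_len = 0
--     b_len = 0
--     for c in sorted(kirjainjono):
--         if c == 'A':
--             a_len += 1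
--         elif c == 'B':
--             b_len += 1
--         else:
--             break
--     k = a_len + b_len
--     mismatch_a = 0  # non-'A' characters inside the A-region
--     ba = 0          # 'B' characters inside the A-region
--     ab = 0          # 'A' characters inside the B-region
--     b_out = 0       # 'B' characters after the B-region
--     for i, c in enumerate(kirjainjono):
--         if i < a_len:
--             if c != 'A':
--                 mismatch_a += 1
--             if c == 'B':
--                 ba += 1
--         elif i < k:
--             if c == 'A':
--                 ab += 1
--         elif c == 'B':
--             b_out += 1
--     # A swap of a misplaced 'B' from the A-region with a misplaced 'A' from the
--     # B-region fixes two letters at once, so min(ba, ab) swaps are saved.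
--     return mismatch_a + ba + b_out - min(ba, ab)
-- ===== Notes on version B (the rewrite author's own statement) =====
-- stated objective: simpler
-- what changed: B keeps the sorted-prefix loop that yields the region sizes but replaces A's misplaced-index lists and the greedy repair scan over the A-region with a single counting pass and the closed form mismatchA + BA + B_out - min(BA, AB).
import Mathlib
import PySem

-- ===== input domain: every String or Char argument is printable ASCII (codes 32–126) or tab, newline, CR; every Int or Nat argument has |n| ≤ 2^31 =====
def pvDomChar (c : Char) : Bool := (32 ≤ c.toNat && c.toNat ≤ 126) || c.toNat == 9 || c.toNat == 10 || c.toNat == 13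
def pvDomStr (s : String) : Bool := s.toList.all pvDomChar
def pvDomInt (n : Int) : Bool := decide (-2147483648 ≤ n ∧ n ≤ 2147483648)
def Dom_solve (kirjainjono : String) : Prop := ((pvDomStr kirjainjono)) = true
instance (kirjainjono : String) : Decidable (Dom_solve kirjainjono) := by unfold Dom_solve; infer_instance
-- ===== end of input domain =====

-- B keeps the sorted-prefix region loop but replaces A's misplaced-index lists and
-- greedy repair scan by one counting pass and a closed form (objective: simpler).

-- ===== PORT A =====

-- first loop: walk the sorted list, counting 'A's then 'B's, break at anything else
def solveAB : List Char → Int → Int → Int × Int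
  | [], a, b => (a, b)
  | c :: rest, a, b =>
    if c == 'A' then solveAB rest (a + 1) b
    else if c == 'B' then solveAB rest a (b + 1)
    else (a, b)

-- second loop: 'for ii in range(pituus)' reading kirjainjono[ii] — ported as the
-- structural recursion over the characters carrying the index ii (exact: ii runs
-- over 0..len-1 and kirjainjono[ii] is the current character)
def solveMark (aL K : Int) : List Char → Int → List Int → List Int → List Int × List Int
  | [], _, av, bv => (av, bv)
  | c :: rest, ii, av, bv =>
    let bv1 := if ii < aL then (if c == 'B' then bv ++ [ii] else bv) else bv
    let st2 :=
      if aL ≤ ii ∧ ii < K then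
        (if c == 'A' then (av ++ [ii], bv1) else (av, bv1))
      else if K ≤ ii then
        (if c == 'A' then (av ++ [ii], bv1)
         else if c == 'B' then (av, bv1 ++ [ii]) else (av, bv1))
      else (av, bv1)
    solveMark aL K rest (ii + 1) st2.1 st2.2

-- third loop: 'for ii in range(A_pituus)' reading kirjainjono[ii] — ported as the
-- structural recursion over the first A_pituus characters; A_vaarin[A_ind] is pyGet?
-- (its 'none' case is Python's IndexError, unreachable here — proven in-range below)
def solveFix (av : List Int) (K : Int) : List Char → Int → Int → Int → Int × Int × Int
  | [], si, ind, bf => (si, ind, bf)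
  | c :: rest, si, ind, bf =>
    if c != 'A' then
      let si' := si + 1
      if (c == 'B') &&
         (match PySem.List.pyGet? av ind with | some v => decide (v < K) | none => false) then
        solveFix av K rest si' (ind + 1) (bf + 1)
      else if c == 'B' then solveFix av K rest si' (ind + 1) bf
      else solveFix av K rest si' ind bf
    else solveFix av K rest si ind bf

def solve (kirjainjono : String) : Int :=
  let s := kirjainjono.toList
  let jarjestetty := PySem.List.sorted s (fun c => c) false
  let lens := solveAB jarjestetty 0 0
  let aL := lens.1
  let bL := lens.2
  let marked := solveMark aL (aL + bL) s 0 [] []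
  let fixed := solveFix marked.1 (aL + bL) (s.take aL.toNat) 0 0 0
  fixed.1 + (marked.2.length : Int) - fixed.2.2

-- ===== PORT B =====

-- Source B's first loop: the run of 'A's then 'B's at the front of the sorted string
def altAB : List Char → Int → Int → Int × Int
  | [], a, b => (a, b)
  | c :: rest, a, b =>
    if c == 'A' then altAB rest (a + 1) b
    else if c == 'B' then altAB rest a (b + 1)
    else (a, b)

-- the single counting pass of Source B ('for i, c in enumerate(...)'), index i carried
def altScan (aL K : Int) : List Char → Int → Int → Int → Int → Int → Int × Int × Int × Int
  | [], _, m, ba, ab, bo => (m, ba, ab, bo)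
  | c :: rest, i, m, ba, ab, bo =>
    let st' :=
      if i < aL then
        ((if c != 'A' then m + 1 else m), (if c == 'B' then ba + 1 else ba), ab, bo)
      else if i < K then
        (m, ba, (if c == 'A' then ab + 1 else ab), bo)
      else if c == 'B' then (m, ba, ab, bo + 1)
      else (m, ba, ab, bo)
    altScan aL K rest (i + 1) st'.1 st'.2.1 st'.2.2.1 st'.2.2.2

def solve_alt (kirjainjono : String) : Int :=
  let s := kirjainjono.toList
  let lens := altAB (PySem.List.sorted s (fun c => c) false) 0 0
  let aL := lens.1
  let K := aL + lens.2
  let r := altScan aL K s 0 0 0 0 0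
  r.1 + r.2.1 + r.2.2.2 - min r.2.1 r.2.2.1

-- ===== PRECONDITION & SPEC =====
def Spec_solve (kirjainjono : String) (out : Int) : Prop := out = solve_alt kirjainjono
instance (kirjainjono : String) (out : Int) : Decidable (Spec_solve kirjainjono out) := by unfold Spec_solve; infer_instance

-- ===== CLAIM (what is proved, stated in full; the proofs are below) =====
def Claim_equal_solve : Prop := ∀ (kirjainjono : String), Dom_solve kirjainjono → Spec_solve kirjainjono (solve kirjainjono)

-- ===== LEMMAS AND PROOFS =====

-- the two region loops are the same recursion
theorem altAB_eq (l : List Char) : ∀ a b : Int, altAB l a b = solveAB l a b := by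
  induction l with
  | nil => intro a b; rfl
  | cons c rest ih =>
    intro a b
    simp only [altAB, solveAB, ih]

-- there is no character strictly between 'A' and 'B'
theorem no_char_between (c : Char) (h1 : 'A' < c) (h2 : c < 'B') : False := by
  rw [Char.lt_def] at h1 h2
  rw [UInt32.lt_iff_toNat_lt] at h1 h2
  simp at h1 h2
  omega

-- the sorted+break loop on a ≤-sorted list all of whose characters are ≥ 'A'
theorem solveAB_all_ge (l : List Char) (hp : l.Pairwise (· ≤ ·)) (hge : ∀ c ∈ l, 'A' ≤ c) :
    ∀ a b : Int, solveAB l a b = (a + (l.count 'A' : Int), b + (l.count 'B' : Int)) := by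
  induction l with
  | nil => intro a b; simp [solveAB]
  | cons c rest ih =>
    intro a b
    rcases List.pairwise_cons.mp hp with ⟨hle, hp'⟩
    have hgec : 'A' ≤ c := hge c (by simp)
    have ih' := ih hp' (fun x hx => hge x (by simp [hx]))
    by_cases hA : c = 'A'
    · subst hA
      simp only [solveAB, beq_self_eq_true, if_true]
      rw [ih']
      simp only [List.count_cons_self]
      refine Prod.ext ?_ ?_ <;> simp <;> push_cast <;> ring
    · by_cases hB : c = 'B'
      · subst hB
        have e1 : (('B' : Char) == 'A') = false := by decide
        simp only [solveAB, e1, Bool.false_eq_true, if_false, beq_self_eq_true, if_true]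
        rw [ih']
        have : ('A' : Char) ≠ 'B' := by decide
        simp only [List.count_cons_self, List.count_cons_of_ne this]
        refine Prod.ext ?_ ?_ <;> simp <;> push_cast <;> ring
      · have hgtB : 'B' < c := by
          rcases lt_trichotomy c 'B' with h | h | h
          · exact absurd (no_char_between c (lt_of_le_of_ne hgec (Ne.symm hA)) h) id
          · exact absurd h hB
          · exact h
        have hrest : ∀ x ∈ rest, x ≠ 'A' ∧ x ≠ 'B' := by
          intro x hx
          have hcx : c ≤ x := hle x hx
          constructor
          · intro he; subst he
            exact absurd (lt_of_lt_of_le hgtB hcx) (by decide)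
          · intro he; subst he
            exact absurd (lt_of_lt_of_le hgtB hcx) (lt_irrefl _)
        have hcA : rest.count 'A' = 0 := by
          rw [List.count_eq_zero]
          intro hmem; exact (hrest 'A' hmem).1 rfl
        have hcB : rest.count 'B' = 0 := by
          rw [List.count_eq_zero]
          intro hmem; exact (hrest 'B' hmem).2 rfl
        have eA : (c == 'A') = false := by simp [hA]
        have eB : (c == 'B') = false := by simp [hB]
        simp only [solveAB, eA, eB, Bool.false_eq_true, if_false]
        simp [List.count_cons, hA, hB, hcA, hcB]

-- the sorted+break loop: (0,0) if some character precedes 'A', else the two counts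
theorem lens_eq (l : List Char) :
    solveAB (PySem.List.sorted l (fun c => c) false) 0 0 =
      (if l.any (fun c => decide (c < 'A')) then ((0 : Int), (0 : Int))
       else ((l.count 'A' : Int), (l.count 'B' : Int))) := by
  by_cases h : l.any (fun c => decide (c < 'A'))
  · rcases List.any_eq_true.mp h with ⟨c, hc, hlt⟩
    have hlt' : c < 'A' := of_decide_eq_true hlt
    cases hs : PySem.List.sorted l (fun c => c) false with
    | nil =>
      exact absurd ((PySem.List.sorted_eq_nil_iff l (fun c => c) false).mp hs ▸ hc) (by simp)
    | cons m t =>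
      have hm : m ≤ c := PySem.List.key_head_sorted_le l (fun c => c) hs c hc
      have hmA : m < 'A' := lt_of_le_of_lt hm hlt'
      have eA : (m == 'A') = false := by
        simp only [beq_eq_false_iff_ne]; exact ne_of_lt hmA
      have eB : (m == 'B') = false := by
        simp only [beq_eq_false_iff_ne]
        exact ne_of_lt (lt_trans hmA (by decide))
      simp [solveAB, eA, eB, h]
  · have hge : ∀ c ∈ PySem.List.sorted l (fun c => c) false, 'A' ≤ c := by
      intro c hc
      rw [PySem.List.mem_sorted] at hc
      simp only [List.any_eq_true, decide_eq_true_eq, not_exists, not_and, not_lt] at h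
      exact h c hc
    rw [solveAB_all_ge _ (PySem.List.sorted_pairwise l (fun c => c)) hge 0 0]
    rw [(PySem.List.sorted_perm l (fun c => c) false).count_eq,
        (PySem.List.sorted_perm l (fun c => c) false).count_eq]
    simp [h]

-- absolute positions (from i) of the characters satisfying p
def idxP (p : Char → Bool) : List Char → Int → List Int
  | [], _ => []
  | c :: r, i => if p c then i :: idxP p r (i + 1) else idxP p r (i + 1)

theorem idxP_length (p : Char → Bool) (l : List Char) :
    ∀ i, (idxP p l i).length = l.countP p := by
  induction l with
  | nil => intro i; simp [idxP]
  | cons c r ih =>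
    intro i
    simp only [idxP, List.countP_cons]
    split <;> rename_i hc <;> simp [hc, ih]

theorem idxP_mem (p : Char → Bool) (l : List Char) :
    ∀ i, ∀ j ∈ idxP p l i, i ≤ j ∧ j < i + l.length := by
  induction l with
  | nil => intro i j hj; simp [idxP] at hj
  | cons c r ih =>
    intro i j hj
    simp only [idxP] at hj
    have step : j ∈ idxP p r (i + 1) → i ≤ j ∧ j < i + ↑(c :: r).length := by
      intro hm
      rcases ih (i + 1) j hm with ⟨h1, h2⟩
      constructor
      · omega
      · simp only [List.length_cons]; push_cast; omega
    split at hj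
    · rcases List.mem_cons.mp hj with rfl | hm
      · refine ⟨le_refl _, ?_⟩
        simp only [List.length_cons]; push_cast; omega
      · exact step hm
    · exact step hj

-- loop2, inside the A-region
theorem mark_head (aL K : Int) (l : List Char) (hAK : aL ≤ K) :
    ∀ (ii : Int) (av bv : List Int), ii + l.length ≤ aL →
      solveMark aL K l ii av bv = (av, bv ++ idxP (· == 'B') l ii) := by
  induction l with
  | nil => intro ii av bv h; simp [solveMark, idxP]
  | cons c r ih =>
    intro ii av bv h
    simp only [List.length_cons] at h
    push_cast at h
    have hii : ii < aL := by omega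
    have h2 : ¬ (aL ≤ ii ∧ ii < K) := by omega
    have h3 : ¬ (K ≤ ii) := by omega
    have hlen : ii + 1 + (r.length : Int) ≤ aL := by omega
    by_cases hc : (c == 'B') = true
    · simp only [solveMark, if_pos hii, hc, if_true, if_neg h2, if_neg h3]
      rw [ih (ii + 1) av (bv ++ [ii]) hlen]
      simp [idxP, hc]
    · simp only [solveMark, if_pos hii, hc, Bool.false_eq_true, if_neg h2, if_neg h3]
      simp only [Bool.not_eq_true] at hc
      rw [if_neg (by simp [hc])]
      rw [ih (ii + 1) av bv hlen]
      simp [idxP, hc]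

-- loop2, inside the B-region
theorem mark_mid (aL K : Int) (l : List Char) :
    ∀ (ii : Int) (av bv : List Int), aL ≤ ii → ii + l.length ≤ K →
      solveMark aL K l ii av bv = (av ++ idxP (· == 'A') l ii, bv) := by
  induction l with
  | nil => intro ii av bv h1 h2; simp [solveMark, idxP]
  | cons c r ih =>
    intro ii av bv h1 h2
    simp only [List.length_cons] at h2
    push_cast at h2
    have hii : ¬ ii < aL := by omega
    have hmid : aL ≤ ii ∧ ii < K := by omega
    have hlen : ii + 1 + (r.length : Int) ≤ K := by omega
    by_cases hc : (c == 'A') = true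
    · simp only [solveMark, if_neg hii, if_pos hmid, hc, if_true]
      rw [ih (ii + 1) (av ++ [ii]) bv (by omega) hlen]
      simp [idxP, hc]
    · simp only [solveMark, if_neg hii, if_pos hmid, hc, Bool.false_eq_true, if_false]
      rw [ih (ii + 1) av bv (by omega) hlen]
      simp [idxP, hc]

-- loop2, in the C-region
theorem mark_tail (aL K : Int) (l : List Char) (hAK : aL ≤ K) :
    ∀ (ii : Int) (av bv : List Int), K ≤ ii →
      solveMark aL K l ii av bv = (av ++ idxP (· == 'A') l ii, bv ++ idxP (· == 'B') l ii) := by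
  induction l with
  | nil => intro ii av bv h1; simp [solveMark, idxP]
  | cons c r ih =>
    intro ii av bv h1
    have hii : ¬ ii < aL := by omega
    have hmid : ¬ (aL ≤ ii ∧ ii < K) := by omega
    have hK : K ≤ ii := h1
    by_cases hcA : (c == 'A') = true
    · have hcB : (c == 'B') = false := by
        simp only [beq_iff_eq] at hcA ⊢; subst hcA; decide
      simp only [solveMark, if_neg hii, if_neg hmid, if_pos hK, hcA, if_true]
      rw [ih (ii + 1) (av ++ [ii]) bv (by omega)]
      simp [idxP, hcA, hcB]
    · by_cases hcB : (c == 'B') = true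
      · simp only [solveMark, if_neg hii, if_neg hmid, if_pos hK, hcA, Bool.false_eq_true,
          if_false, hcB, if_true]
        rw [ih (ii + 1) av (bv ++ [ii]) (by omega)]
        simp [idxP, hcA, hcB]
      · simp only [solveMark, if_neg hii, if_neg hmid, if_pos hK, hcA, hcB,
          Bool.false_eq_true, if_false]
        rw [ih (ii + 1) av bv (by omega)]
        simp [idxP, hcA, hcB]

theorem solveMark_append (aL K : Int) (x y : List Char) :
    ∀ (ii : Int) (av bv : List Int),
      solveMark aL K (x ++ y) ii av bv =
        solveMark aL K y (ii + x.length) (solveMark aL K x ii av bv).1 (solveMark aL K x ii av bv).2 := by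
  induction x with
  | nil => intro ii av bv; simp [solveMark]
  | cons c r ih =>
    intro ii av bv
    simp only [List.cons_append, solveMark, List.length_cons]
    rw [ih]
    push_cast
    have hidx : ii + ((r.length : Int) + 1) = ii + 1 + (r.length : Int) := by ring
    rw [hidx]

theorem altScan_append (aL K : Int) (x y : List Char) :
    ∀ (i m ba ab bo : Int),
      altScan aL K (x ++ y) i m ba ab bo =
        (let r := altScan aL K x i m ba ab bo
         altScan aL K y (i + x.length) r.1 r.2.1 r.2.2.1 r.2.2.2) := by
  induction x with
  | nil => intro i m ba ab bo; simp [altScan]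
  | cons c r ih =>
    intro i m ba ab bo
    simp only [List.cons_append, altScan, List.length_cons]
    rw [ih]
    push_cast
    have hidx : i + ((r.length : Int) + 1) = i + 1 + (r.length : Int) := by ring
    rw [hidx]

theorem scan_head (aL K : Int) (l : List Char) :
    ∀ (i m ba ab bo : Int), i + l.length ≤ aL →
      altScan aL K l i m ba ab bo =
        (m + (l.countP (· != 'A') : Int), ba + (l.count 'B' : Int), ab, bo) := by
  induction l with
  | nil => intro i m ba ab bo h; simp [altScan]
  | cons c r ih =>
    intro i m ba ab bo h
    simp only [List.length_cons] at h
    push_cast at h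
    have hi : i < aL := by omega
    simp only [altScan, if_pos hi]
    rw [ih (i + 1) _ _ ab bo (by omega)]
    simp only [List.countP_cons, List.count_cons]
    by_cases hc : (c == 'A') = true
    · have h1 : (c != 'A') = false := by simp [bne, hc]
      have hcB : (c == 'B') = false := by
        simp only [beq_iff_eq] at hc ⊢; subst hc; decide
      simp [h1, hcB]
    · have h1 : (c != 'A') = true := by simp [bne, hc]
      by_cases hcB : (c == 'B') = true
      · simp [h1, hcB]; push_cast; constructor <;> ring
      · simp [h1, hc, hcB]; push_cast; ring

theorem scan_mid (aL K : Int) (l : List Char) :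
    ∀ (i m ba ab bo : Int), aL ≤ i → i + l.length ≤ K →
      altScan aL K l i m ba ab bo = (m, ba, ab + (l.count 'A' : Int), bo) := by
  induction l with
  | nil => intro i m ba ab bo h1 h2; simp [altScan]
  | cons c r ih =>
    intro i m ba ab bo h1 h2
    simp only [List.length_cons] at h2
    push_cast at h2
    have hi : ¬ i < aL := by omega
    have hiK : i < K := by omega
    simp only [altScan, if_neg hi, if_pos hiK]
    rw [ih (i + 1) m ba _ bo (by omega) (by omega)]
    simp only [List.count_cons]
    by_cases hc : (c == 'A') = true
    · simp [hc]; push_cast; ring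
    · simp only [beq_iff_eq] at hc
      simp [hc]

theorem scan_tail (aL K : Int) (l : List Char) (hAK : aL ≤ K) :
    ∀ (i m ba ab bo : Int), K ≤ i →
      altScan aL K l i m ba ab bo = (m, ba, ab, bo + (l.count 'B' : Int)) := by
  induction l with
  | nil => intro i m ba ab bo h1; simp [altScan]
  | cons c r ih =>
    intro i m ba ab bo h1
    have hi : ¬ i < aL := by omega
    have hiK : ¬ i < K := by omega
    simp only [altScan, if_neg hi, if_neg hiK]
    rw [show (i + 1) = ((i + 1 : Int)) from rfl]
    by_cases hc : (c == 'B') = true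
    · simp only [hc, if_true]
      rw [ih (i + 1) m ba ab _ (by omega)]
      simp only [List.count_cons, hc]
      simp; push_cast; ring
    · simp only [hc, Bool.false_eq_true, if_false]
      rw [ih (i + 1) m ba ab bo (by omega)]
      simp only [List.count_cons, hc]
      simp only [beq_iff_eq] at hc
      simp [hc]

-- loop3: with A_vaarin ascending below/above K (first AB entries below), the greedy
-- scan counts the non-'A's, advances on 'B's and fixes min(#B, AB - start) of them
theorem solveFix_spec (av : List Int) (K : Int) (AB : Nat)
    (Hlow : ∀ j : Nat, j < AB → ∃ v, av[j]? = some v ∧ v < K)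
    (Hhigh : ∀ j : Nat, AB ≤ j → j < av.length → ∃ v, av[j]? = some v ∧ K ≤ v) :
    ∀ (l : List Char) (ind : Nat) (si bf : Int), ind + l.count 'B' ≤ av.length →
      solveFix av K l si (ind : Int) bf =
        (si + (l.countP (· != 'A') : Int), (ind : Int) + (l.count 'B' : Int),
         bf + (min (l.count 'B') (AB - ind) : Nat)) := by
  intro l
  induction l with
  | nil => intro ind si bf h; simp [solveFix]
  | cons c r ih =>
    intro ind si bf h
    have hc1 : ((ind : Int) + 1) = ((ind + 1 : Nat) : Int) := by push_cast; ring
    by_cases hcB : (c == 'B') = true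
    · have hA : (c != 'A') = true := by
        simp only [beq_iff_eq] at hcB; subst hcB; decide
      have hcnt : (c :: r).count 'B' = r.count 'B' + 1 := by
        simp [List.count_cons, hcB]
      have hcntP : (c :: r).countP (· != 'A') = r.countP (· != 'A') + 1 := by
        simp [List.countP_cons, hA]
      rw [hcnt] at h
      have hind : ind < av.length := by omega
      by_cases hlow : ind < AB
      · rcases Hlow ind hlow with ⟨v, hv, hvK⟩
        have hget : PySem.List.pyGet? av ((ind : Nat) : Int) = some v := by
          rw [PySem.List.pyGet?_natCast]; exact hv
        have hdec : decide (v < K) = true := decide_eq_true hvK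
        simp only [solveFix, hA, if_true, hcB, hget, hdec, Bool.and_self, if_pos]
        rw [hc1, ih (ind + 1) (si + 1) (bf + 1) (by omega)]
        simp only [Prod.mk.injEq, hcnt, hcntP, and_true]
        omega
      · rcases Hhigh ind (by omega) hind with ⟨v, hv, hvK⟩
        have hget : PySem.List.pyGet? av ((ind : Nat) : Int) = some v := by
          rw [PySem.List.pyGet?_natCast]; exact hv
        have hdec : decide (v < K) = false := decide_eq_false (by omega)
        simp only [solveFix, hA, if_true, hcB, hget, hdec, Bool.and_false,
          Bool.false_eq_true, if_false]
        rw [hc1, ih (ind + 1) (si + 1) bf (by omega)]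
        simp only [Prod.mk.injEq, hcnt, hcntP, and_true]
        omega
    · have hcnt : (c :: r).count 'B' = r.count 'B' := by
        simp [List.count_cons, hcB]
      rw [hcnt] at h
      by_cases hA : (c != 'A') = true
      · have hcntP : (c :: r).countP (· != 'A') = r.countP (· != 'A') + 1 := by
          simp [List.countP_cons, hA]
        simp only [solveFix, hA, if_true, hcB, Bool.false_and, Bool.false_eq_true, if_false]
        rw [ih ind (si + 1) bf (by omega)]
        simp only [Prod.mk.injEq, hcnt, hcntP, and_true]
        omega
      · have hcntP : (c :: r).countP (· != 'A') = r.countP (· != 'A') := by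
          simp only [List.countP_cons]
          simp [hA]
        simp only [solveFix, hA, Bool.false_eq_true, if_false]
        rw [ih ind si bf (by omega)]
        simp only [Prod.mk.injEq, hcnt, hcntP, and_true, and_self]

-- final assembly: counts over the head/mid/tail decomposition
theorem solve_eq_alt (s : String) : solve s = solve_alt s := by
  simp only [solve, solve_alt]
  rw [altAB_eq, lens_eq s.toList]
  by_cases h : s.toList.any (fun c => decide (c < 'A')) = true
  · rw [if_pos h]
    simp only [Int.toNat_zero, List.take_zero, Int.add_zero, Int.zero_add]
    rw [mark_tail 0 0 s.toList (le_refl 0) 0 [] [] (le_refl 0)]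
    rw [scan_tail 0 0 s.toList (le_refl 0) 0 0 0 0 0 (le_refl 0)]
    simp [solveFix, idxP_length, List.count_eq_countP]
  · rw [if_neg h]
    set l := s.toList with hl
    set nA := l.count 'A' with hnA
    set nB := l.count 'B' with hnB
    set head := l.take nA with hhead
    set rest := l.drop nA with hrest
    set mid := rest.take nB with hmid
    set tail := rest.drop nB with htail
    have hd1 : head ++ rest = l := List.take_append_drop nA l
    have hd2 : mid ++ tail = rest := List.take_append_drop nB rest
    have hnAle : nA ≤ l.length := List.count_le_length
    have hBle : nB ≤ l.countP (fun c => !(c == 'A')) := by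
      rw [hnB, List.count_eq_countP]
      refine List.countP_mono_left ?_
      intro x _ hx
      simp only [beq_iff_eq] at hx ⊢
      subst hx; decide
    have hsplit : l.length = l.countP (· == 'A') + l.countP (fun c => !(c == 'A')) := by
      have := List.length_eq_countP_add_countP (l := l) (· == 'A')
      simpa [decide_not] using this
    have hnA' : l.countP (· == 'A') = nA := (List.count_eq_countP).symm
    have hlenhead : head.length = nA := by
      rw [hhead, List.length_take]; omega
    have hlenrest : rest.length = l.length - nA := by rw [hrest, List.length_drop]
    have hlenmid : mid.length = nB := by
      rw [hmid, List.length_take]; omega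
    have hAK : (nA : Int) ≤ (nA : Int) + (nB : Int) := by push_cast; omega
    -- loop2 result
    have hmark : solveMark (nA : Int) ((nA : Int) + (nB : Int)) l 0 [] [] =
        (idxP (· == 'A') mid (nA : Int) ++ idxP (· == 'A') tail ((nA : Int) + (nB : Int)),
         idxP (· == 'B') head 0 ++ idxP (· == 'B') tail ((nA : Int) + (nB : Int))) := by
      conv_lhs => rw [← hd1, ← hd2]
      rw [solveMark_append]
      rw [mark_head _ _ head hAK 0 [] [] (by rw [hlenhead]; omega)]
      simp only [List.nil_append]
      rw [solveMark_append]
      rw [mark_mid _ _ mid (0 + (head.length : Int)) [] (idxP (· == 'B') head 0)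
          (by rw [hlenhead]; omega) (by rw [hlenhead, hlenmid]; push_cast; omega)]
      simp only [List.nil_append]
      rw [mark_tail _ _ tail hAK _ _ _ (by rw [hlenhead, hlenmid]; push_cast; omega)]
      rw [hlenhead, hlenmid]
      norm_num
    -- loop1 take
    have htake : l.take ((nA : Int)).toNat = head := by
      rw [Int.toNat_natCast]
    -- counts of 'A' split over the three regions
    have hAsplit : nA = head.count 'A' + mid.count 'A' + tail.count 'A' := by
      conv_lhs => rw [hnA, ← hd1, ← hd2]
      simp [List.count_append]
      omega
    have hheadsplit : head.length = head.countP (· == 'A') + head.countP (fun c => !(c == 'A')) := by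
      have := List.length_eq_countP_add_countP (l := head) (· == 'A')
      simpa [decide_not] using this
    have hheadB : head.count 'B' ≤ head.countP (fun c => !(c == 'A')) := by
      rw [List.count_eq_countP]
      refine List.countP_mono_left ?_
      intro x _ hx
      simp only [beq_iff_eq] at hx ⊢
      subst hx; decide
    -- loop3 result
    set AB := mid.countP (· == 'A') with hAB
    set av := idxP (· == 'A') mid (nA : Int) ++ idxP (· == 'A') tail ((nA : Int) + (nB : Int)) with hav
    have hlen1 : (idxP (· == 'A') mid (nA : Int)).length = AB := idxP_length _ _ _
    have havlen : av.length = AB + tail.countP (· == 'A') := by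
      rw [hav, List.length_append, hlen1, idxP_length]
    have Hlow : ∀ j : Nat, j < AB → ∃ v, av[j]? = some v ∧ v < (nA : Int) + (nB : Int) := by
      intro j hj
      have hj' : j < (idxP (· == 'A') mid (nA : Int)).length := by rw [hlen1]; exact hj
      rw [hav, List.getElem?_append_left hj']
      refine ⟨_, List.getElem?_eq_getElem hj', ?_⟩
      have hmem := idxP_mem (· == 'A') mid (nA : Int) _ (List.getElem_mem hj')
      rw [hlenmid] at hmem
      omega
    have Hhigh : ∀ j : Nat, AB ≤ j → j < av.length → ∃ v, av[j]? = some v ∧ (nA : Int) + (nB : Int) ≤ v := by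
      intro j hj1 hj2
      rw [hav, List.getElem?_append_right (by rw [hlen1]; exact hj1)]
      rw [hav, List.length_append] at hj2
      have hj3 : j - (idxP (· == 'A') mid (nA : Int)).length <
          (idxP (· == 'A') tail ((nA : Int) + (nB : Int))).length := by omega
      refine ⟨_, List.getElem?_eq_getElem hj3, ?_⟩
      have hmem := idxP_mem (· == 'A') tail ((nA : Int) + (nB : Int)) _ (List.getElem_mem hj3)
      omega
    have hbound : 0 + head.count 'B' ≤ av.length := by
      rw [havlen]
      have h1 : head.countP (fun c => !(c == 'A')) = mid.countP (· == 'A') + tail.countP (· == 'A') := by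
        have e1 : head.count 'A' = head.countP (· == 'A') := List.count_eq_countP
        have e2 : mid.count 'A' = mid.countP (· == 'A') := List.count_eq_countP
        have e3 : tail.count 'A' = tail.countP (· == 'A') := List.count_eq_countP
        omega
      omega
    have hfix := solveFix_spec av ((nA : Int) + (nB : Int)) AB Hlow Hhigh head 0 0 0 hbound
    rw [htake, hmark]
    simp only at hfix ⊢
    rw [← hav] at *
    rw [show ((0 : Nat) : Int) = (0 : Int) from rfl] at hfix
    rw [hfix]
    -- B side
    have hscan : altScan (nA : Int) ((nA : Int) + (nB : Int)) l 0 0 0 0 0 =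
        ((head.countP (· != 'A') : Int), (head.count 'B' : Int), (mid.count 'A' : Int), (tail.count 'B' : Int)) := by
      conv_lhs => rw [← hd1, ← hd2]
      rw [altScan_append]
      rw [scan_head _ _ head 0 0 0 0 0 (by rw [hlenhead]; omega)]
      simp only
      rw [altScan_append]
      rw [scan_mid _ _ mid _ _ _ _ _ (by rw [hlenhead]; omega) (by rw [hlenhead, hlenmid]; push_cast; omega)]
      simp only
      rw [scan_tail _ _ tail hAK _ _ _ _ _ (by rw [hlenhead, hlenmid]; push_cast; omega)]
      norm_num
    rw [hscan]
    simp only [List.length_append, idxP_length]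
    have eAB : mid.count 'A' = AB := List.count_eq_countP
    have eB1 : head.count 'B' = head.countP (· == 'B') := List.count_eq_countP
    have eB2 : tail.count 'B' = tail.countP (· == 'B') := List.count_eq_countP
    push_cast
    omega

-- ===== VERDICT (by name: the statement is the Claim_ definition above) =====
theorem solve_spec : Claim_equal_solve := by
  intro kirjainjono _hdom
  unfold Spec_solve
  exact solve_eq_alt kirjainjono
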